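-- pv_equiv track=rewrite | github.com/lexiathilla/AOBaddies | APOproject1v2.py | _bits_for_count
-- ===== SOURCE A (Python) =====
-- def _bits_for_count(count, Ki_bits):
--     bits = {}
--     remaining = int(count)
--     for k in range(1, Ki_bits + 1):
--         w = 2**(k-1)
--         if remaining >= w:
--             bits[k] = 1
--             remaining -= w
--         else:
--             bits[k] = 0
--     return bits
-- ===== SOURCE B (Python) =====
-- def _bits_for_count(count, Ki_bits):
--     # Each "bit" k is 1 exactly when the greedy prefix of weights 1,2,4,... fits,
--     # i.e. when int(count) >= 2**k - 1; compute each entry independently.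
--     c = int(count)
--     return {k: (1 if c >= 2 ** k - 1 else 0) for k in range(1, Ki_bits + 1)}
-- ===== Notes on version B (the rewrite author's own statement) =====
-- stated objective: simpler
-- what changed: Replaced the sequential greedy-subtraction loop with its mutable `remaining` accumulator by a dict comprehension computing each entry independently: bit k is 1 iff int(count) >= 2**k - 1 (the prefix-of-ones characterisation of the greedy result).
import Mathlib
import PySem

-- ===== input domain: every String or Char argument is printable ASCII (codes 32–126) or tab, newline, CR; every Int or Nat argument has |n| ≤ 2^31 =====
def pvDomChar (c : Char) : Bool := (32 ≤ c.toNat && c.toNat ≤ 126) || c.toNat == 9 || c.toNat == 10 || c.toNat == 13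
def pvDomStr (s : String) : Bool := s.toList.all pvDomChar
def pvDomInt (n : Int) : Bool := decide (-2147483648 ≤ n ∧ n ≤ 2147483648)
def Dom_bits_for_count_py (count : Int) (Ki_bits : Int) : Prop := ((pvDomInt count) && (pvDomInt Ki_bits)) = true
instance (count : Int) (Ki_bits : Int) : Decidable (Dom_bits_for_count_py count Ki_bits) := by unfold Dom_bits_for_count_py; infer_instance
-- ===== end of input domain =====

-- B replaces A's greedy-subtraction loop (mutable `remaining`) by computing each
-- entry independently (bit k = 1 iff count >= 2^k - 1); objective: simpler.

-- ===== PORT A =====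
def bits_for_count_py (count : Int) (Ki_bits : Int) : List (Int × Int) :=
  -- bits = {}; remaining = int(count); for k in range(1, Ki_bits+1): ...
  let res := (PySem.List.pyRange 1 (Ki_bits + 1) 1).foldl
    (fun (st : PySem.Dict Int Int × Int) k =>
      let w : Int := 2 ^ (k - 1).toNat   -- 2**(k-1), exact since k ≥ 1 in the range
      if st.2 ≥ w then (st.1.insert k 1, st.2 - w) else (st.1.insert k 0, st.2))
    (PySem.Dict.empty, count)
  res.1.items

-- ===== PORT B =====
def bits_for_count_py_alt (count : Int) (Ki_bits : Int) : List (Int × Int) :=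
  -- {k: (1 if c >= 2**k - 1 else 0) for k in range(1, Ki_bits+1)} — keys distinct
  (PySem.List.pyRange 1 (Ki_bits + 1) 1).map
    (fun k => (k, if count ≥ 2 ^ k.toNat - 1 then (1 : Int) else 0))

-- ===== PRECONDITION & SPEC =====
def Spec_bits_for_count_py (count : Int) (Ki_bits : Int) (out : List (Int × Int)) : Prop := out = bits_for_count_py_alt count Ki_bits
instance (count : Int) (Ki_bits : Int) (out : List (Int × Int)) : Decidable (Spec_bits_for_count_py count Ki_bits out) := by unfold Spec_bits_for_count_py; infer_instance

-- ===== CLAIM (what is proved, stated in full; the proofs are below) =====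
def Claim_equal_bits_for_count_py : Prop := ∀ (count : Int) (Ki_bits : Int), Dom_bits_for_count_py count Ki_bits → Spec_bits_for_count_py count Ki_bits (bits_for_count_py count Ki_bits)

-- ===== LEMMAS AND PROOFS =====

-- the value of A's `remaining` after processing k = 1..n
def pvRem (count : Int) : Nat → Int
  | 0 => count
  | n + 1 => if pvRem count n ≥ 2 ^ n then pvRem count n - 2 ^ n else pvRem count n

theorem pvRem_spec (count : Int) (n : Nat) :
    (count ≥ 2 ^ n - 1 → pvRem count n = count - 2 ^ n + 1) ∧
    (count < 2 ^ n - 1 → pvRem count n < 2 ^ n) := by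
  induction n with
  | zero => simp [pvRem]; omega
  | succ n ih =>
    have hp : (0:Int) < 2 ^ n := by positivity
    have h2 : (2:Int) ^ (n+1) = 2 ^ n + 2 ^ n := by ring
    constructor
    · intro h
      have := ih.1 (by omega)
      simp only [pvRem]
      rw [if_pos (by omega)]
      omega
    · intro h
      by_cases h1 : count ≥ 2 ^ n - 1
      · have := ih.1 h1
        simp only [pvRem]
        rw [if_neg (by omega)]
        omega
      · have := ih.2 (by omega)
        simp only [pvRem]
        rw [if_neg (by omega)]
        omega

-- whether the step at k = n+1 fires, characterised without `remaining`
theorem pvStep_iff (count : Int) (n : Nat) :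
    (pvRem count n ≥ 2 ^ n) ↔ (count ≥ 2 ^ (n+1) - 1) := by
  have hs := pvRem_spec count n
  have h2 : (2:Int) ^ (n+1) = 2 ^ n + 2 ^ n := by ring
  constructor
  · intro h
    by_cases h1 : count ≥ 2 ^ n - 1
    · have := hs.1 h1; omega
    · have := hs.2 (by omega); omega
  · intro h
    have hp : (0:Int) < 2 ^ n := by positivity
    have := hs.1 (by omega); omega

theorem pv_fold (count : Int) (n : Nat) :
    (PySem.List.pyRange 1 ((n : Int) + 1) 1).foldl
      (fun (st : PySem.Dict Int Int × Int) k =>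
        let w : Int := 2 ^ (k - 1).toNat
        if st.2 ≥ w then (st.1.insert k 1, st.2 - w) else (st.1.insert k 0, st.2))
      (PySem.Dict.empty, count)
    = (PySem.Dict.mk ((PySem.List.pyRange 1 ((n : Int) + 1) 1).map
        (fun k => (k, if count ≥ 2 ^ k.toNat - 1 then (1 : Int) else 0))),
       pvRem count n) := by
  induction n with
  | zero =>
    rw [PySem.List.pyRange_one_eq_nil (by norm_num)]
    simp [pvRem, PySem.Dict.empty]
  | succ n ih =>
    have hcast : ((n + 1 : Nat) : Int) + 1 = ((n : Int) + 1) + 1 := by push_cast; ring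
    rw [hcast, PySem.List.pyRange_one_succ_right (by omega),
        List.foldl_append, List.map_append, ih]
    have htn : (((n : Int) + 1) - 1).toNat = n := by omega
    have htk : ((n : Int) + 1).toNat = n + 1 := by omega
    simp only [List.foldl_cons, List.foldl_nil, List.map_cons, List.map_nil, htn, htk]
    by_cases hc : pvRem count n ≥ 2 ^ n
    · rw [if_pos hc, if_pos ((pvStep_iff count n).mp hc)]
      refine Prod.ext ?_ ?_
      · apply PySem.Dict.ext
        simp [PySem.Dict.items_insert]
      · simp only [pvRem]; rw [if_pos hc]
    · rw [if_neg hc, if_neg (by rw [← pvStep_iff count n]; exact hc)]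
      refine Prod.ext ?_ ?_
      · apply PySem.Dict.ext
        simp [PySem.Dict.items_insert]
      · simp only [pvRem]; rw [if_neg hc]

-- ===== VERDICT (by name: the statement is the Claim_ definition above) =====
theorem bits_for_count_py_spec : Claim_equal_bits_for_count_py := by
  intro count Ki_bits _
  unfold Spec_bits_for_count_py bits_for_count_py bits_for_count_py_alt
  by_cases h : Ki_bits ≤ 0
  · rw [PySem.List.pyRange_one_eq_nil (by omega)]
    simp [PySem.Dict.empty]
  · have hn : Ki_bits = ((Ki_bits.toNat : Int)) := by omega
    rw [hn, pv_fold count Ki_bits.toNat]
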